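-- pv_equiv track=rewrite | github.com/shreyansh424singh/COL215-SW-KMap | Assignment 5 (SW3)/a3_old.py | get_ends
-- ===== SOURCE A (Python) =====
-- def get_ends(a, n):
--     if len(a) == n:
--         return (0, n-1)
--
--     if not (min(a) == 0 and max(a) == n-1):
--         return (min(a), max(a))
--
--     ct = 0
--     while ct in a:
--         ct += 1
--     r = ct - 1
--
--     ct = n - 1
--     while ct in a:
--         ct -= 1
--     l = ct + 1
--
--     return (l, r)
-- ===== SOURCE B (Python) =====
-- def get_ends(a, n):
--     if len(a) == n:
--         return (0, n - 1)
--     if not (min(a) == 0 and max(a) == n - 1):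
--         return (min(a), max(a))
--     missing = set(range(n)) - set(a)
--     if not missing:
--         return (0, n - 1)
--     return (max(missing) + 1, min(missing) - 1)
-- ===== Notes on version B (the rewrite author's own statement) =====
-- stated objective: simpler
-- what changed: The two directional while-loop membership scans are replaced by one set complement missing = set(range(n)) - set(a), whose max+1 and min-1 are the gap boundaries.
import Mathlib
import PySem

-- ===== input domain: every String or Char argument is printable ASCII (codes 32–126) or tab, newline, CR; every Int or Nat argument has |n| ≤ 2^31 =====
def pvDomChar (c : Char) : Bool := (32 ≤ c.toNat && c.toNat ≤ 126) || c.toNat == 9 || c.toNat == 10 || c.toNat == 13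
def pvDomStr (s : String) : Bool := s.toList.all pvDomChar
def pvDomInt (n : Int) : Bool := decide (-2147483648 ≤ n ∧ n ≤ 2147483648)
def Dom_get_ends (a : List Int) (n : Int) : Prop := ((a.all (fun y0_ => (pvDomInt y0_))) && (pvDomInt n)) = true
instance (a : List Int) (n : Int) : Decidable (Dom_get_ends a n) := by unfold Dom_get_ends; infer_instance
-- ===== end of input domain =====

-- B replaces A's two while-loop membership scans by a single set complement (simpler); same return value wherever A returns.

-- ===== PORT A =====
-- 'while ct in a: ct += 1'; fuel makes the same scan total (proved sufficient below; the loop stops at n, which is not in a)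
def pvScanUp (a : List Int) : Int → Nat → Int
  | ct, 0 => ct
  | ct, f + 1 => if ct ∈ a then pvScanUp a (ct + 1) f else ct

-- 'while ct in a: ct -= 1'
def pvScanDown (a : List Int) : Int → Nat → Int
  | ct, 0 => ct
  | ct, f + 1 => if ct ∈ a then pvScanDown a (ct - 1) f else ct

def get_ends (a : List Int) (n : Int) : List Int :=
  if (a.length : Int) = n then [0, n - 1]
  else
    match PySem.List.min? a (fun x => x), PySem.List.max? a (fun x => x) with
    | some mn, some mx =>
      if ¬(mn = 0 ∧ mx = n - 1) then [mn, mx]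
      else
        let r := pvScanUp a 0 (n.toNat + 1) - 1
        let l := pvScanDown a (n - 1) (n.toNat + 1) + 1
        [l, r]
    | _, _ => []  -- unreachable under Pre_: min/max raise ValueError only on a = []

-- ===== PORT B =====
def get_ends_alt (a : List Int) (n : Int) : List Int :=
  if (a.length : Int) = n then [0, n - 1]
  else
    match PySem.List.min? a (fun x => x) with
    | none => []  -- unreachable under Pre_: min raises ValueError only on a = []
    | some mn =>
      match PySem.List.max? a (fun x => x) with
      | none => []  -- unreachable under Pre_
      | some mx =>
        if ¬(mn = 0 ∧ mx = n - 1) then [mn, mx]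
        else
          let missing := PySem.Set.diff (PySem.Set.ofList (PySem.List.pyRange 0 n 1)) (PySem.Set.ofList a)
          if missing = [] then [0, n - 1]
          else [(PySem.List.max? missing (fun x => x)).getD 0 + 1,
                (PySem.List.min? missing (fun x => x)).getD 0 - 1]

-- ===== PRECONDITION & SPEC =====
-- Pre_ excludes exactly a = [] with n ≠ 0, where Python's min(a) raises ValueError.
def Pre_get_ends (a : List Int) (n : Int) : Prop := a ≠ [] ∨ (a.length : Int) = n
instance (a : List Int) (n : Int) : Decidable (Pre_get_ends a n) := by unfold Pre_get_ends; infer_instance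
def pvWitness_get_ends : List Int × Int := ([0, 2], 3)

def Spec_get_ends (a : List Int) (n : Int) (out : List Int) : Prop := out = get_ends_alt a n
instance (a : List Int) (n : Int) (out : List Int) : Decidable (Spec_get_ends a n out) := by unfold Spec_get_ends; infer_instance

-- ===== CLAIM (what is proved, stated in full; the proofs are below) =====
def Claim_equal_get_ends : Prop := ∀ (a : List Int) (n : Int), Dom_get_ends a n → Pre_get_ends a n → Spec_get_ends a n (get_ends a n)

-- ===== LEMMAS AND PROOFS =====

-- pvScanUp from ct with a stopper m ∉ a above ct returns the least x ≥ ct with x ∉ a.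
theorem pvScanUp_spec (a : List Int) (m : Int) (hm : m ∉ a) :
    ∀ (fuel : Nat) (ct : Int), ct ≤ m → (m - ct).toNat < fuel →
      pvScanUp a ct fuel ∉ a ∧ ct ≤ pvScanUp a ct fuel ∧
        ∀ k, ct ≤ k → k < pvScanUp a ct fuel → k ∈ a := by
  intro fuel
  induction fuel with
  | zero => intro ct _ h; omega
  | succ f ih =>
    intro ct hle hf
    simp only [pvScanUp]
    by_cases hin : ct ∈ a
    · rw [if_pos hin]
      have hne : ct ≠ m := fun h => hm (h ▸ hin)
      have h1 : ct + 1 ≤ m := by omega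
      have h2 : (m - (ct + 1)).toNat < f := by omega
      obtain ⟨p1, p2, p3⟩ := ih (ct + 1) h1 h2
      refine ⟨p1, by omega, ?_⟩
      intro k hk1 hk2
      rcases eq_or_lt_of_le hk1 with h | h
      · exact h ▸ hin
      · exact p3 k (by omega) hk2
    · rw [if_neg hin]
      exact ⟨hin, le_refl _, fun k h1 h2 => absurd h2 (by omega)⟩

theorem pvScanDown_spec (a : List Int) (m : Int) (hm : m ∉ a) :
    ∀ (fuel : Nat) (ct : Int), m ≤ ct → (ct - m).toNat < fuel →
      pvScanDown a ct fuel ∉ a ∧ pvScanDown a ct fuel ≤ ct ∧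
        ∀ k, k ≤ ct → pvScanDown a ct fuel < k → k ∈ a := by
  intro fuel
  induction fuel with
  | zero => intro ct _ h; omega
  | succ f ih =>
    intro ct hle hf
    simp only [pvScanDown]
    by_cases hin : ct ∈ a
    · rw [if_pos hin]
      have hne : ct ≠ m := fun h => hm (h ▸ hin)
      obtain ⟨p1, p2, p3⟩ := ih (ct - 1) (by omega) (by omega)
      refine ⟨p1, by omega, ?_⟩
      intro k hk1 hk2
      rcases eq_or_lt_of_le hk1 with h | h
      · exact h ▸ hin
      · exact p3 k (by omega) hk2
    · rw [if_neg hin]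
      exact ⟨hin, le_refl _, fun k h1 h2 => absurd h2 (by omega)⟩

theorem mem_missing (a : List Int) (n x : Int) :
    x ∈ PySem.Set.diff (PySem.Set.ofList (PySem.List.pyRange 0 n 1)) (PySem.Set.ofList a) ↔
      (0 ≤ x ∧ x < n ∧ x ∉ a) := by
  rw [PySem.Set.mem_diff, PySem.Set.mem_ofList, PySem.Set.mem_ofList, PySem.List.mem_pyRange_one]
  tauto

-- ===== VERDICT (by name: the statement is the Claim_ definition above) =====
theorem get_ends_spec : Claim_equal_get_ends := by
  intro a n _ hpre
  unfold Spec_get_ends get_ends get_ends_alt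
  by_cases hlen : (a.length : Int) = n
  · simp [hlen]
  · simp only [hlen, if_false]
    have ha : a ≠ [] := by
      rcases hpre with h | h
      · exact h
      · exact absurd h hlen
    have hmin : ∃ mn, PySem.List.min? a (fun x => x) = some mn := by
      cases h : PySem.List.min? a (fun x => x) with
      | none => exact absurd ((PySem.List.min?_eq_none_iff _ _).mp h) ha
      | some mn => exact ⟨mn, rfl⟩
    have hmax : ∃ mx, PySem.List.max? a (fun x => x) = some mx := by
      cases h : PySem.List.max? a (fun x => x) with
      | none => exact absurd ((PySem.List.max?_eq_none_iff _ _).mp h) ha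
      | some mx => exact ⟨mx, rfl⟩
    obtain ⟨mn, hmn⟩ := hmin
    obtain ⟨mx, hmx⟩ := hmax
    rw [hmn, hmx]
    by_cases hg : ¬(mn = 0 ∧ mx = n - 1)
    · simp [hg]
    · simp only [hg, if_false]
      push Not at hg
      obtain ⟨hmn0, hmxn⟩ := hg
      subst hmn0; subst hmxn
      -- facts about a
      have h0a : (0 : Int) ∈ a := PySem.List.min?_mem hmn
      have hlb : ∀ y ∈ a, (0 : Int) ≤ y := PySem.List.min?_isMin hmn
      have hub : ∀ y ∈ a, y ≤ n - 1 := PySem.List.max?_isMax hmx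
      have hn1 : 1 ≤ n := by have := hub 0 h0a; omega
      have hnna : (n : Int) ∉ a := fun h => by have := hub n h; omega
      have hm1na : (-1 : Int) ∉ a := fun h => by have := hlb (-1) h; omega
      -- scan results
      obtain ⟨hu1, hu2, hu3⟩ := pvScanUp_spec a n hnna (n.toNat + 1) 0 (by omega) (by omega)
      obtain ⟨hd1, hd2, hd3⟩ := pvScanDown_spec a (-1) hm1na (n.toNat + 1) (n - 1) (by omega) (by omega)
      set u := pvScanUp a 0 (n.toNat + 1) with hu
      set d := pvScanDown a (n - 1) (n.toNat + 1) with hd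
      have hun : u ≤ n := by
        by_contra h
        exact hnna (hu3 n (by omega) (by omega))
      have hdm : -1 ≤ d := by
        by_contra h
        exact hm1na (hd3 (-1) (by omega) (by omega))
      set missing := PySem.Set.diff (PySem.Set.ofList (PySem.List.pyRange 0 n 1)) (PySem.Set.ofList a) with hmiss
      by_cases hemp : missing = []
      · -- every 0 ≤ k < n is in a; so u = n and d = -1
        have hall : ∀ k : Int, 0 ≤ k → k < n → k ∈ a := by
          intro k h1 h2
          by_contra h
          have : k ∈ missing := (mem_missing a n k).mpr ⟨h1, h2, h⟩
          rw [hemp] at this; simp at this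
        have hue : u = n := by
          rcases lt_or_eq_of_le hun with h | h
          · exact absurd (hall u hu2 h) hu1
          · exact h
        have hde : d = -1 := by
          rcases lt_or_eq_of_le hdm with h | h
          · exact absurd (hall d (by omega) (by omega)) hd1
          · exact h.symm
        simp [hemp, hue, hde]
      · simp only [hemp, if_false]
        have hminm : ∃ m, PySem.List.min? missing (fun x => x) = some m := by
          cases h : PySem.List.min? missing (fun x => x) with
          | none => exact absurd ((PySem.List.min?_eq_none_iff _ _).mp h) hemp
          | some m => exact ⟨m, rfl⟩
        have hmaxm : ∃ M, PySem.List.max? missing (fun x => x) = some M := by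
          cases h : PySem.List.max? missing (fun x => x) with
          | none => exact absurd ((PySem.List.max?_eq_none_iff _ _).mp h) hemp
          | some M => exact ⟨M, rfl⟩
        obtain ⟨m, hm⟩ := hminm
        obtain ⟨M, hM⟩ := hmaxm
        rw [hm, hM]
        obtain ⟨hm0, hmn', hmna⟩ := (mem_missing a n m).mp (PySem.List.min?_mem hm)
        obtain ⟨hM0, hMn', hMna⟩ := (mem_missing a n M).mp (PySem.List.max?_mem hM)
        -- u = m
        have hum : u < n := by
          by_contra h
          exact hmna (hu3 m hm0 (by omega))
        have hum2 : u ∈ missing := (mem_missing a n u).mpr ⟨hu2, hum, hu1⟩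
        have h1 : m ≤ u := PySem.List.min?_isMin hm u hum2
        have h2 : u ≤ m := by
          by_contra h
          exact hmna (hu3 m hm0 (by omega))
        -- d = M
        have hdM : 0 ≤ d := by
          by_contra h
          exact hMna (hd3 M (by omega) (by omega))
        have hdm2 : d ∈ missing := (mem_missing a n d).mpr ⟨hdM, by omega, hd1⟩
        have h3 : d ≤ M := PySem.List.max?_isMax hM d hdm2
        have h4 : M ≤ d := by
          by_contra h
          exact hMna (hd3 M (by omega) (by omega))
        have hdMe : d = M := le_antisymm h3 h4
        have hume : u = m := le_antisymm h2 h1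
        simp only [Option.getD_some, hdMe, hume]
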